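-- pv_equiv track=rewrite | github.com/dracohu2025-cloud/draco-skills-collection | Ark Agent Plan Version/wechat-article-camofox/scripts/fetch_wechat_article.py | _render_images
-- ===== SOURCE A (Python) =====
-- def _image_block(item: dict, index: int) -> str:
--     src = (item.get('src') or '').strip()
--     alt = (item.get('alt') or '').strip()
--     if not src:
--         return ''
--     return f"![{alt or f'image-{index}'}]({src})"
--
-- def _render_images(entries: list[tuple[int, str]], start: int, end: int, image_list: list[dict], image_index: int) -> tuple[list[str], int]:
--     blocks: list[str] = []
--     for _, stripped in entries[start:end]:
--         if not stripped.startswith('- img'):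
--             continue
--         if image_index >= len(image_list):
--             break
--         img_md = _image_block(image_list[image_index], image_index + 1)
--         image_index += 1
--         if img_md:
--             blocks.append(img_md)
--             blocks.append('')
--     return blocks, image_index
-- ===== SOURCE B (Python) =====
-- def _image_block(item: dict, index: int) -> str:
--     src = (item.get('src') or '').strip()
--     alt = (item.get('alt') or '').strip()
--     if not src:
--         return ''
--     return f"![{alt or f'image-{index}'}]({src})"
--
-- def _render_images(entries, start, end, image_list, image_index):
--     # Staged pipeline instead of an interleaved loop with break:
--     # count placeholders, clamp to the images still available, then build the
--     # output by comprehensions over the index range.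
--     count = sum(1 for _, s in entries[start:end] if s.startswith('- img'))
--     n = max(0, min(count, len(image_list) - image_index))
--     mds = [_image_block(image_list[image_index + j], image_index + j + 1)
--            for j in range(n)]
--     blocks = [piece for md in mds if md for piece in (md, '')]
--     return blocks, image_index + n
-- ===== Notes on version B (the rewrite author's own statement) =====
-- stated objective: alternative
-- what changed: Replaces A's single interleaved scan with in-loop break and mutable accumulators by a staged pipeline: count the '- img' placeholders, clamp to the images still available, then build the markdown blocks with index-range comprehensions (map + filter + flatten) and return image_index + n.
import Mathlib
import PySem

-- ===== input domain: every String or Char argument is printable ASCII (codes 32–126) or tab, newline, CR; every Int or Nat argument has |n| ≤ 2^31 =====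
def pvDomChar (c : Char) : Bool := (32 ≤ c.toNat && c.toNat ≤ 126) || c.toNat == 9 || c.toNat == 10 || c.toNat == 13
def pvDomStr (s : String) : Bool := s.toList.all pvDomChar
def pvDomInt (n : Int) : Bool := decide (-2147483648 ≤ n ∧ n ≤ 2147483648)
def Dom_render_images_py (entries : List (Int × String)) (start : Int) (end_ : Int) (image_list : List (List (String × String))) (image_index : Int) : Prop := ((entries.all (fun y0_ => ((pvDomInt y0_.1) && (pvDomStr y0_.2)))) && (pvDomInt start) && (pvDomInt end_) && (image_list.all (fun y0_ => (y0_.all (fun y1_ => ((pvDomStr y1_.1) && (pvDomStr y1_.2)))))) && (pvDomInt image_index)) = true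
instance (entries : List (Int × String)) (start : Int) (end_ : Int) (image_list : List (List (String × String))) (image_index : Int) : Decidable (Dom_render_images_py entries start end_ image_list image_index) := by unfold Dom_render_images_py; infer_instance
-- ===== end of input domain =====

-- B replaces A's interleaved scan-with-break by a staged pipeline: count the
-- '- img' placeholders, clamp, then map/filter/flatten over the index range.

-- ===== PORT A =====
-- item.get(k): first-match lookup on the association list (dict in insertion order)
def dictGetStr (item : List (String × String)) (k : String) : String :=
  ((item.find? (fun p => p.1 == k)).map (·.2)).getD ""

-- _image_block: 'item.get(k) or ""' = getD "" here (the falsy str is "")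
def imageBlock (item : List (String × String)) (index : Int) : String :=
  let src := PySem.Str.strip (dictGetStr item "src")
  let alt := PySem.Str.strip (dictGetStr item "alt")
  if src == "" then ""
  else PySem.Str.join ""
    ["![", if alt == "" then PySem.Str.join "" ["image-", PySem.Int.toStr index] else alt,
     "](", src, ")"]

-- A's for-loop over entries[start:end] with continue/break, carrying (blocks, image_index)
def renderLoopA : List (Int × String) → List (List (String × String)) → Int → List String → List String × Int
  | [], _, ii, blocks => (blocks, ii)
  | (_, stripped) :: rest, il, ii, blocks =>
    if ¬ (PySem.Str.startswith stripped "- img") then renderLoopA rest il ii blocks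
    else if (il.length : Int) ≤ ii then (blocks, ii)
    else
      match PySem.List.pyGet? il ii with
      | none => (blocks, ii)  -- IndexError (image_index < -len); excluded by Pre_
      | some item =>
        let md := imageBlock item (ii + 1)
        renderLoopA rest il (ii + 1) (if md ≠ "" then blocks ++ [md, ""] else blocks)

def render_images_py (entries : List (Int × String)) (start : Int) (end_ : Int) (image_list : List (List (String × String))) (image_index : Int) : List String × Int :=
  renderLoopA (PySem.List.slice entries (some start) (some end_)) image_list image_index []

-- ===== PORT B =====
-- the stages of Source B, one helper per line of the pipeline
-- count = sum(1 for _, s in slice if s.startswith('- img'))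
def countImg (es : List (Int × String)) : Int :=
  ((es.filter (fun p => PySem.Str.startswith p.2 "- img")).length : Int)

-- n = max(0, min(count, len(image_list) - image_index))
def clampN (c L ii : Int) : Int := max 0 (min c (L - ii))

-- the comprehension body: _image_block(image_list[image_index + j], image_index + j + 1)
def renderAt (il : List (List (String × String))) (ii : Int) (j : Nat) : String :=
  imageBlock ((PySem.List.pyGet? il (ii + (j : Int))).getD []) (ii + (j : Int) + 1)

def render_images_py_alt (entries : List (Int × String)) (start : Int) (end_ : Int) (image_list : List (List (String × String))) (image_index : Int) : List String × Int :=
  let n : Int := clampN (countImg (PySem.List.slice entries (some start) (some end_)))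
                        (image_list.length : Int) image_index
  let mds : List String := (List.range n.toNat).map (renderAt image_list image_index)
  ((mds.filter (fun md => md ≠ "")).flatMap (fun md => [md, ""]), image_index + n)

-- ===== PRECONDITION & SPEC =====
-- Pre_ excludes exactly the inputs where A raises IndexError: image_index below
-- -len(image_list) while the slice still contains a '- img' placeholder entry.
def Pre_render_images_py (entries : List (Int × String)) (start : Int) (end_ : Int) (image_list : List (List (String × String))) (image_index : Int) : Prop :=
  -(image_list.length : Int) ≤ image_index ∨
    (PySem.List.slice entries (some start) (some end_)).all
      (fun p => !(PySem.Str.startswith p.2 "- img")) = true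
instance (entries : List (Int × String)) (start : Int) (end_ : Int) (image_list : List (List (String × String))) (image_index : Int) : Decidable (Pre_render_images_py entries start end_ image_list image_index) := by unfold Pre_render_images_py; infer_instance

def pvWitness_render_images_py : (List (Int × String)) × Int × Int × (List (List (String × String))) × Int :=
  ([(0, "- img"), (1, "text")], 0, 2, [[("src", "a.png"), ("alt", "pic")]], 0)

def Spec_render_images_py (entries : List (Int × String)) (start : Int) (end_ : Int) (image_list : List (List (String × String))) (image_index : Int) (out : List String × Int) : Prop := out = render_images_py_alt entries start end_ image_list image_index
instance (entries : List (Int × String)) (start : Int) (end_ : Int) (image_list : List (List (String × String))) (image_index : Int) (out : List String × Int) : Decidable (Spec_render_images_py entries start end_ image_list image_index out) := by unfold Spec_render_images_py; infer_instance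

-- ===== CLAIM (what is proved, stated in full; the proofs are below) =====
def Claim_equal_render_images_py : Prop := ∀ (entries : List (Int × String)) (start : Int) (end_ : Int) (image_list : List (List (String × String))) (image_index : Int), Dom_render_images_py entries start end_ image_list image_index → Pre_render_images_py entries start end_ image_list image_index → Spec_render_images_py entries start end_ image_list image_index (render_images_py entries start end_ image_list image_index)

-- ===== LEMMAS AND PROOFS =====

lemma countImg_nonneg (es : List (Int × String)) : 0 ≤ countImg es := by
  unfold countImg; exact Int.natCast_nonneg _

lemma renderAt_shift (il : List (List (String × String))) (ii : Int) (j : Nat) :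
    renderAt il ii (j + 1) = renderAt il (ii + 1) j := by
  have h : ii + ((j + 1 : Nat) : Int) = (ii + 1) + (j : Int) := by push_cast; ring
  simp only [renderAt, h]

lemma map_range_shift' {α : Type} (f g : Nat → α) (h : ∀ j, f (j + 1) = g j) (n : Nat) :
    (List.range (n + 1)).map f = f 0 :: (List.range n).map g := by
  rw [List.range_succ_eq_map, List.map_cons, List.map_map]
  congr 1
  exact List.map_congr_left (fun j _ => h j)

lemma map_range_shift (il : List (List (String × String))) (ii : Int) (n : Nat) :
    (List.range (n + 1)).map (renderAt il ii)
      = renderAt il ii 0 :: (List.range n).map (renderAt il (ii + 1)) :=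
  map_range_shift' (renderAt il ii) (renderAt il (ii + 1)) (renderAt_shift il ii) n

-- the output pair of B's pipeline as a function of the sliced entry list
def bOut (es : List (Int × String)) (il : List (List (String × String))) (ii : Int) : List String × Int :=
  ((((List.range (clampN (countImg es) (il.length : Int) ii).toNat).map
      (renderAt il ii)).filter (fun md => md ≠ "")).flatMap (fun md => [md, ""]),
   ii + clampN (countImg es) (il.length : Int) ii)

lemma loop_eq (il : List (List (String × String))) :
    ∀ (es : List (Int × String)) (ii : Int) (blocks : List String),
      (-(il.length : Int) ≤ ii ∨
        es.all (fun p => !(PySem.Str.startswith p.2 "- img")) = true) →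
      renderLoopA es il ii blocks = (blocks ++ (bOut es il ii).1, (bOut es il ii).2) := by
  intro es
  induction es with
  | nil =>
    intro ii blocks _
    have h0 : clampN (countImg []) (il.length : Int) ii = 0 := by
      simp only [countImg, List.filter_nil, List.length_nil, Nat.cast_zero, clampN]; omega
    simp [renderLoopA, bOut, h0]
  | cons e rest ih =>
    intro ii blocks hpre
    obtain ⟨k, s⟩ := e
    have hc0 : 0 ≤ countImg rest := countImg_nonneg rest
    by_cases hs : PySem.Chars.startswith s.toList ['-', ' ', 'i', 'm', 'g'] = true
    · -- matching placeholder entry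
      have hcount : countImg ((k, s) :: rest) = countImg rest + 1 := by
        simp [countImg, PySem.Str.startswith, hs]
      have hii : -(il.length : Int) ≤ ii := by
        rcases hpre with h | h
        · exact h
        · simp [List.all_cons, PySem.Str.startswith] at h
          exact absurd hs (by simp [h.1])
      by_cases hge : (il.length : Int) ≤ ii
      · -- break: no images left
        have hn : clampN (countImg ((k, s) :: rest)) (il.length : Int) ii = 0 := by
          rw [hcount]; unfold clampN; omega
        have hA : renderLoopA ((k, s) :: rest) il ii blocks = (blocks, ii) := by
          simp [renderLoopA, PySem.Str.startswith, hs, hge]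
        rw [hA]
        simp [bOut, hn]
      · -- consume one image
        rw [not_le] at hge
        obtain ⟨item, hget⟩ : ∃ item, PySem.List.pyGet? il ii = some item := by
          rcases hn : PySem.List.pyGet? il ii with _ | x
          · rw [PySem.List.pyGet?_eq_none_iff] at hn
            exact absurd ⟨hii, hge⟩ hn
          · exact ⟨x, rfl⟩
        set md0 := imageBlock item (ii + 1) with hmd0
        have hstep : renderLoopA ((k, s) :: rest) il ii blocks
            = renderLoopA rest il (ii + 1)
                (if md0 ≠ "" then blocks ++ [md0, ""] else blocks) := by
          simp only [renderLoopA, PySem.Str.startswith, hget, ite_not, ← hmd0]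
          simp [hs, not_le.mpr hge]
        set n' : Int := clampN (countImg rest) (il.length : Int) (ii + 1) with hn'def
        have hn'0 : 0 ≤ n' := by rw [hn'def]; unfold clampN; omega
        have hn : clampN (countImg ((k, s) :: rest)) (il.length : Int) ii = n' + 1 := by
          rw [hcount, hn'def]; unfold clampN; omega
        have htn : (clampN (countImg ((k, s) :: rest)) (il.length : Int) ii).toNat
            = n'.toNat + 1 := by omega
        have hhead : renderAt il ii 0 = md0 := by
          simp [renderAt, hget, hmd0]
        rw [hstep, ih (ii + 1) _ (Or.inl (by omega))]
        have htn2 : (n' + 1).toNat = n'.toNat + 1 := by omega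
        unfold bOut
        rw [hn, htn2, map_range_shift, hhead, ← hn'def]
        refine Prod.ext ?_ ?_
        · by_cases hmd : md0 = ""
          · simp [hmd]
          · simp [hmd, List.append_assoc]
        · simp only
          omega
    · -- non-matching entry: skipped by A, not counted by B
      have hcount : countImg ((k, s) :: rest) = countImg rest := by
        simp [countImg, PySem.Str.startswith, hs]
      have hskip : renderLoopA ((k, s) :: rest) il ii blocks = renderLoopA rest il ii blocks := by
        simp [renderLoopA, PySem.Str.startswith, hs]
      have hb : bOut ((k, s) :: rest) il ii = bOut rest il ii := by
        simp [bOut, hcount]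
      rw [hskip, hb]
      refine ih ii blocks ?_
      rcases hpre with h | h
      · exact Or.inl h
      · refine Or.inr ?_
        simp [List.all_cons] at h ⊢
        exact h.2

-- ===== VERDICT (by name: the statement is the Claim_ definition above) =====
theorem render_images_py_spec : Claim_equal_render_images_py := by
  intro entries start end_ il ii _ hpre
  unfold Spec_render_images_py render_images_py render_images_py_alt
  simpa [bOut] using loop_eq il (PySem.List.slice entries (some start) (some end_)) ii [] hpre
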